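-- pv_equiv track=rewrite | github.com/chrishofer/WS23_DAT_SD1 | solutions/examples3/bsp1.py | duplikate
-- ===== SOURCE A (Python) =====
-- from typing import List
--
-- def duplikate(zahlen: List[List[int]]) -> List[int]:
--     dup = []
--
--     for i in range(len(zahlen)):
--         teilliste_als_set = set(zahlen[i])
--         if len(zahlen[i]) == len(teilliste_als_set):
--             dup.append(False)
--         else:
--             dup.append(True)
--
--     return dup
-- ===== SOURCE B (Python) =====
-- from typing import List
--
-- def duplikate(zahlen: List[List[int]]) -> List[int]:
--     def has_adjacent_dup(s):
--         for prev, cur in zip(s, s[1:]):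
--             if prev == cur:
--                 return True
--         return False
--     return [has_adjacent_dup(sorted(teil)) for teil in zahlen]
-- ===== Notes on version B (the rewrite author's own statement) =====
-- stated objective: alternative
-- what changed: Replaces per-sublist set construction and length comparison with sorting a copy of each sublist and a single adjacent-pair scan that stops at the first repeat.
import Mathlib
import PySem

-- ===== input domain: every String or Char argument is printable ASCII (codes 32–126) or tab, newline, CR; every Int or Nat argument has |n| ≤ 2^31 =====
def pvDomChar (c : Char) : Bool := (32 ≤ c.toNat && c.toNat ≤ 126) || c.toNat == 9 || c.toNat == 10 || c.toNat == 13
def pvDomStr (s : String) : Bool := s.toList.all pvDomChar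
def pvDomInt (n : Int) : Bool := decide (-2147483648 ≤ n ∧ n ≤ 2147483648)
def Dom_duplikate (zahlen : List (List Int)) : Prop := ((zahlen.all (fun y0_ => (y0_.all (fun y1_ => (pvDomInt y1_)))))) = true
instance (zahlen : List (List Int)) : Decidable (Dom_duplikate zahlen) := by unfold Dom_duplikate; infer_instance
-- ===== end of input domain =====

-- B replaces A's per-sublist set/length test by sorting a copy and scanning adjacent pairs (alternative algorithm, same results).

-- ===== PORT A =====
def duplikate (zahlen : List (List Int)) : List Bool :=
  (PySem.List.pyRange 0 zahlen.length 1).foldl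
    (fun dup i =>
      let teilliste_als_set := PySem.Set.ofList (PySem.List.pyGetD zahlen i [])
      if (PySem.List.pyGetD zahlen i []).length = teilliste_als_set.length then
        dup ++ [false]
      else
        dup ++ [true])
    []

-- ===== PORT B =====
def hasAdjacentDup : List Int → Bool
  | prev :: cur :: rest => if prev = cur then true else hasAdjacentDup (cur :: rest)
  | _ => false

def duplikate_alt (zahlen : List (List Int)) : List Bool :=
  zahlen.map (fun teil => hasAdjacentDup (PySem.List.sorted teil (fun x => x) false))

-- ===== PRECONDITION & SPEC =====
def Spec_duplikate (zahlen : List (List Int)) (out : List Bool) : Prop := out = duplikate_alt zahlen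
instance (zahlen : List (List Int)) (out : List Bool) : Decidable (Spec_duplikate zahlen out) := by unfold Spec_duplikate; infer_instance

-- ===== CLAIM (what is proved, stated in full; the proofs are below) =====
def Claim_equal_duplikate : Prop := ∀ (zahlen : List (List Int)), Dom_duplikate zahlen → Spec_duplikate zahlen (duplikate zahlen)

-- ===== LEMMAS AND PROOFS =====

-- A's test: set(xs) has the same length as xs iff xs has no duplicates.
theorem ofList_length_eq_iff_nodup (l : List Int) :
    (PySem.Set.ofList l).length = l.length ↔ l.Nodup := by
  constructor
  · intro h
    have hperm : (PySem.Set.ofList l).Perm l.dedup := by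
      rw [List.perm_ext_iff_of_nodup (PySem.Set.nodup_ofList l) l.nodup_dedup]
      intro x
      simp [PySem.Set.mem_ofList]
    have hlen : l.dedup.length = l.length := by
      have := hperm.length_eq
      omega
    have : l.dedup = l := (l.dedup_sublist).eq_of_length hlen
    exact List.dedup_eq_self.mp this
  · intro h
    rw [PySem.Set.ofList_eq_self_of_nodup l h]

-- B's test: on a ≤-sorted list, no adjacent equal pair iff no duplicates at all.
theorem hasAdjacentDup_eq_false_iff (s : List Int) (hs : s.Pairwise (· ≤ ·)) :
    hasAdjacentDup s = false ↔ s.Nodup := by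
  induction s with
  | nil => simp [hasAdjacentDup]
  | cons a t ih =>
    cases t with
    | nil => simp [hasAdjacentDup]
    | cons b u =>
      have hab : a ≤ b := (List.pairwise_cons.mp hs).1 b (by simp)
      have hbu : ∀ x ∈ u, b ≤ x := fun x hx =>
        (List.pairwise_cons.mp (List.pairwise_cons.mp hs).2).1 x hx
      have ht : (b :: u).Pairwise (· ≤ ·) := (List.pairwise_cons.mp hs).2
      by_cases hEq : a = b
      · subst hEq
        simp [hasAdjacentDup]
      · rw [show hasAdjacentDup (a :: b :: u) = hasAdjacentDup (b :: u) by
          simp [hasAdjacentDup, hEq]]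
        rw [ih ht]
        constructor
        · intro hnd
          refine List.nodup_cons.mpr ⟨?_, hnd⟩
          intro hmem
          rcases List.mem_cons.mp hmem with h | h
          · exact hEq h
          · have := hbu a h
            exact hEq (le_antisymm hab this)
        · exact fun h => (List.nodup_cons.mp h).2

-- the two per-sublist tests agree
theorem per_sublist (t : List Int) :
    (if t.length = (PySem.Set.ofList t).length then false else true)
      = hasAdjacentDup (PySem.List.sorted t (fun x => x) false) := by
  have hperm : (PySem.List.sorted t (fun x => x) false).Perm t :=
    PySem.List.sorted_perm t (fun x => x) false
  have hpw : (PySem.List.sorted t (fun x => x) false).Pairwise (· ≤ ·) :=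
    PySem.List.sorted_pairwise t (fun x => x)
  by_cases hnd : t.Nodup
  · have h1 : (PySem.Set.ofList t).length = t.length := (ofList_length_eq_iff_nodup t).mpr hnd
    have h2 : hasAdjacentDup (PySem.List.sorted t (fun x => x) false) = false :=
      (hasAdjacentDup_eq_false_iff _ hpw).mpr (hperm.nodup_iff.mpr hnd)
    simp [h1, h2]
  · have h1 : ¬ (PySem.Set.ofList t).length = t.length :=
      fun h => hnd ((ofList_length_eq_iff_nodup t).mp h)
    have h2 : hasAdjacentDup (PySem.List.sorted t (fun x => x) false) = true := by
      rcases Bool.eq_false_or_eq_true (hasAdjacentDup (PySem.List.sorted t (fun x => x) false)) with h | h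
      · exact h
      · exact absurd (hperm.nodup_iff.mp ((hasAdjacentDup_eq_false_iff _ hpw).mp h)) hnd
    rw [h2, if_neg (fun h => h1 h.symm)]

-- ===== VERDICT (by name: the statement is the Claim_ definition above) =====
theorem duplikate_spec : Claim_equal_duplikate := by
  intro zahlen _
  unfold Spec_duplikate duplikate duplikate_alt
  rw [show (fun (dup : List Bool) (i : Int) =>
        let teilliste_als_set := PySem.Set.ofList (PySem.List.pyGetD zahlen i [])
        if (PySem.List.pyGetD zahlen i []).length = teilliste_als_set.length then
          dup ++ [false]
        else
          dup ++ [true])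
      = (fun dup i => dup ++ [if (PySem.List.pyGetD zahlen i []).length =
            (PySem.Set.ofList (PySem.List.pyGetD zahlen i [])).length then false else true]) from by
    funext dup i
    dsimp only
    split_ifs <;> rfl]
  rw [PySem.List.foldl_pyRange_zero_pyGetD' zahlen []
    (fun acc t => acc ++ [if t.length = (PySem.Set.ofList t).length then false else true]) []]
  rw [PySem.List.foldl_append_singleton_eq_map]
  simp only [List.nil_append]
  refine List.map_congr_left (fun a _ => ?_)
  rw [← per_sublist a]
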